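-- pv_equiv track=rewrite | github.com/paiml/depyler | examples/hard_generators.py | pipeline_abs_dedup_sort
-- ===== SOURCE A (Python) =====
-- def pipeline_abs_dedup_sort(nums: list[int]) -> list[int]:
--     """Pipeline: absolute value -> deduplicate -> sort."""
--     abs_vals: list[int] = []
--     for x in nums:
--         if x < 0:
--             abs_vals.append(-x)
--         else:
--             abs_vals.append(x)
--     seen: list[int] = []
--     for x in abs_vals:
--         found: bool = False
--         for s in seen:
--             if s == x:
--                 found = True
--                 break
--         if not found:
--             seen.append(x)
--     for i in range(len(seen)):
--         for j in range(i + 1, len(seen)):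
--             if seen[i] > seen[j]:
--                 temp: int = seen[i]
--                 seen[i] = seen[j]
--                 seen[j] = temp
--     return seen
-- ===== SOURCE B (Python) =====
-- def pipeline_abs_dedup_sort(nums: list[int]) -> list[int]:
--     """Pipeline: absolute value -> sort ascending -> adjacent-deduplicate."""
--     abs_vals = [-x if x < 0 else x for x in nums]
--     abs_vals.sort()
--     result: list[int] = []
--     for x in abs_vals:
--         if not result or result[-1] != x:
--             result.append(x)
--     return result
-- ===== Notes on version B (the rewrite author's own statement) =====
-- stated objective: faster
-- what changed: A deduplicates with a quadratic membership scan and then sorts with a quadratic in-place compare-and-swap double loop; B first sorts the absolute values (library sort) and then deduplicates in one linear adjacency pass over the sorted list.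
import Mathlib
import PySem

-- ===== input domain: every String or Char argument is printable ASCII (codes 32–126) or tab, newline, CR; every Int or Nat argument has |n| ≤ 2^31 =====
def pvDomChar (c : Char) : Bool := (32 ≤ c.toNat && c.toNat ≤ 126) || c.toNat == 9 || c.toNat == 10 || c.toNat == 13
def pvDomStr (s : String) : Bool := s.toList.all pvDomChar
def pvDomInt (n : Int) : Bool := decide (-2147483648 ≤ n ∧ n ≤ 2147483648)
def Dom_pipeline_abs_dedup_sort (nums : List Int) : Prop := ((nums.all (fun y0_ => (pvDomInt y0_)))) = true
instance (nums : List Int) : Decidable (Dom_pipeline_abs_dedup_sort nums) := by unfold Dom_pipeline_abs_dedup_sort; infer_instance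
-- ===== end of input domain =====

-- B replaces A's quadratic membership-scan dedup followed by a quadratic in-place swap sort
-- by sort-first (library sort) followed by one linear adjacent-duplicate pass.

-- ===== PORT A =====
-- the inner 'for s in seen: if s == x: found = True; break' loop of A
def pvFound (seen : List Int) (x : Int) : Bool :=
  match seen with
  | [] => false
  | s :: rest => if s == x then true else pvFound rest x

def pipeline_abs_dedup_sort (nums : List Int) : List Int :=
  let abs_vals := nums.foldl (fun acc x => if x < 0 then acc ++ [-x] else acc ++ [x]) []
  let seen := abs_vals.foldl (fun seen x => if pvFound seen x then seen else seen ++ [x]) []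
  (PySem.List.pyRange 0 (seen.length : Int) 1).foldl (fun s i =>
    (PySem.List.pyRange (i + 1) (s.length : Int) 1).foldl (fun s j =>
      if PySem.List.pyGetD s j 0 < PySem.List.pyGetD s i 0 then
        PySem.List.pySetD (PySem.List.pySetD s i (PySem.List.pyGetD s j 0)) j
          (PySem.List.pyGetD s i 0)
      else s) s) seen

-- ===== PORT B =====
def pipeline_abs_dedup_sort_alt (nums : List Int) : List Int :=
  let abs_vals := nums.map (fun x => if x < 0 then -x else x)
  let abs_vals := PySem.List.sorted abs_vals (fun x => x) false
  abs_vals.foldl (fun result x =>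
    if result.isEmpty || PySem.List.pyGetD result (-1) 0 != x then result ++ [x]
    else result) []

-- ===== PRECONDITION & SPEC =====
def Spec_pipeline_abs_dedup_sort (nums : List Int) (out : List Int) : Prop := out = pipeline_abs_dedup_sort_alt nums
instance (nums : List Int) (out : List Int) : Decidable (Spec_pipeline_abs_dedup_sort nums out) := by unfold Spec_pipeline_abs_dedup_sort; infer_instance

-- ===== CLAIM (what is proved, stated in full; the proofs are below) =====
def Claim_equal_pipeline_abs_dedup_sort : Prop := ∀ (nums : List Int), Dom_pipeline_abs_dedup_sort nums → Spec_pipeline_abs_dedup_sort nums (pipeline_abs_dedup_sort nums)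

-- ===== LEMMAS AND PROOFS =====

-- A's inner swap pass, seen structurally: carry the running minimum, leave the displaced maxima behind
def pvGo (a : Int) (l : List Int) : Int × List Int :=
  match l with
  | [] => (a, [])
  | x :: xs =>
    if x < a then
      let p := pvGo x xs; (p.1, a :: p.2)
    else
      let p := pvGo a xs; (p.1, x :: p.2)

theorem pvGo_length (a : Int) (l : List Int) : (pvGo a l).2.length = l.length := by
  induction l generalizing a with
  | nil => rfl
  | cons x xs ih => simp only [pvGo]; split <;> simp [ih]

-- A's double swap loop, seen structurally: selection sort
def pvSSort (l : List Int) : List Int :=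
  match l with
  | [] => []
  | a :: xs =>
    let p := pvGo a xs
    p.1 :: pvSSort p.2
termination_by l.length
decreasing_by simp [pvGo_length]

theorem pvGo_perm (a : Int) (l : List Int) :
    ((pvGo a l).1 :: (pvGo a l).2).Perm (a :: l) := by
  induction l generalizing a with
  | nil => simp [pvGo]
  | cons x xs ih =>
    simp only [pvGo]; split
    · exact (List.Perm.swap a (pvGo x xs).1 (pvGo x xs).2).trans ((ih x).cons a)
    · exact ((List.Perm.swap x (pvGo a xs).1 (pvGo a xs).2).trans ((ih a).cons x)).trans
        (List.Perm.swap a x xs)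

theorem pvGo_min (a : Int) (l : List Int) :
    (pvGo a l).1 ≤ a ∧ ∀ y ∈ l, (pvGo a l).1 ≤ y := by
  induction l generalizing a with
  | nil => simp [pvGo]
  | cons x xs ih =>
    simp only [pvGo]; split
    · rename_i h
      refine ⟨le_trans (ih x).1 (le_of_lt h), ?_⟩
      intro y hy
      rcases List.mem_cons.1 hy with rfl | hy
      · exact (ih y).1
      · exact (ih x).2 y hy
    · rename_i h
      refine ⟨(ih a).1, ?_⟩
      intro y hy
      rcases List.mem_cons.1 hy with rfl | hy
      · exact le_trans (ih a).1 (not_lt.1 h)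
      · exact (ih a).2 y hy

theorem pvSSort_perm (l : List Int) : (pvSSort l).Perm l := by
  induction l using pvSSort.induct with
  | case1 => simp [pvSSort]
  | case2 a xs p ih =>
    simp only [pvSSort]
    exact (ih.cons _).trans (pvGo_perm a xs)

theorem pvSSort_pairwise (l : List Int) : (pvSSort l).Pairwise (· ≤ ·) := by
  induction l using pvSSort.induct with
  | case1 => simp [pvSSort]
  | case2 a xs p ih =>
    simp only [pvSSort]
    refine List.pairwise_cons.2 ⟨?_, ih⟩
    intro y hy
    have hy' : y ∈ (pvGo a xs).2 := ((pvSSort_perm (pvGo a xs).2).mem_iff).1 hy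
    have hmem : y ∈ a :: xs := (pvGo_perm a xs).subset (List.mem_cons_of_mem _ hy')
    rcases List.mem_cons.1 hmem with h | h
    · exact h ▸ (pvGo_min a xs).1
    · exact (pvGo_min a xs).2 y h

-- indexing/assignment at the junction of an append
theorem pvGet_append (pre rest : List Int) (a d : Int) :
    PySem.List.pyGetD (pre ++ a :: rest) (pre.length : Int) d = a := by
  rw [PySem.List.pyGetD_natCast]
  simp

theorem pvSet_append (pre rest : List Int) (a v : Int) :
    PySem.List.pySetD (pre ++ a :: rest) (pre.length : Int) v = pre ++ v :: rest := by
  rw [PySem.List.pySetD_natCast]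
  simp

-- one inner pass of A's sort is pvGo
theorem pvInner_eq (suf : List Int) : ∀ (pre mid : List Int) (a : Int) (lo hi : Int),
    lo = (pre.length : Int) + 1 + mid.length → hi = lo + suf.length →
    (PySem.List.pyRange lo hi 1).foldl
      (fun s j =>
        if PySem.List.pyGetD s j 0 < PySem.List.pyGetD s (pre.length : Int) 0 then
          PySem.List.pySetD (PySem.List.pySetD s (pre.length : Int) (PySem.List.pyGetD s j 0)) j
            (PySem.List.pyGetD s (pre.length : Int) 0)
        else s) (pre ++ a :: (mid ++ suf))
    = pre ++ (pvGo a suf).1 :: (mid ++ (pvGo a suf).2) := by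
  induction suf with
  | nil =>
    intro pre mid a lo hi hlo hhi
    have h : hi ≤ lo := by simp at hhi; omega
    rw [PySem.List.pyRange_one_eq_nil h]
    simp [pvGo]
  | cons x rest ih =>
    intro pre mid a lo hi hlo hhi
    have hlt : lo < hi := by simp at hhi; omega
    rw [PySem.List.pyRange_one_cons hlt, List.foldl_cons]
    have hsplit : pre ++ a :: (mid ++ x :: rest) = (pre ++ a :: mid) ++ x :: rest := by simp
    have hj : lo = (((pre ++ a :: mid).length : Nat) : Int) := by simp [hlo]; omega
    have hga : PySem.List.pyGetD (pre ++ a :: (mid ++ x :: rest)) (pre.length : Int) 0 = a :=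
      pvGet_append pre (mid ++ x :: rest) a 0
    have hgx : PySem.List.pyGetD (pre ++ a :: (mid ++ x :: rest)) lo 0 = x := by
      rw [hsplit, hj]; exact pvGet_append (pre ++ a :: mid) rest x 0
    rw [hga, hgx]
    by_cases hc : x < a
    · rw [if_pos hc]
      have hs1 : PySem.List.pySetD (pre ++ a :: (mid ++ x :: rest)) (pre.length : Int) x
          = pre ++ x :: (mid ++ x :: rest) := pvSet_append pre (mid ++ x :: rest) a x
      rw [hs1]
      have hs2 : PySem.List.pySetD (pre ++ x :: (mid ++ x :: rest)) lo a
          = pre ++ x :: ((mid ++ [a]) ++ rest) := by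
        have hsplit2 : pre ++ x :: (mid ++ x :: rest) = (pre ++ x :: mid) ++ x :: rest := by simp
        have hj2 : lo = (((pre ++ x :: mid).length : Nat) : Int) := by simp [hlo]; omega
        rw [hsplit2, hj2, pvSet_append (pre ++ x :: mid) rest x a]
        simp
      rw [hs2]
      rw [ih pre (mid ++ [a]) x (lo + 1) hi (by simp [hlo]; omega) (by simp at hhi ⊢; omega)]
      simp only [pvGo, if_pos hc]
      simp
    · rw [if_neg hc]
      have hmid : pre ++ a :: (mid ++ x :: rest) = pre ++ a :: ((mid ++ [x]) ++ rest) := by simp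
      rw [hmid]
      rw [ih pre (mid ++ [x]) a (lo + 1) hi (by simp [hlo]; omega) (by simp at hhi ⊢; omega)]
      simp only [pvGo, if_neg hc]
      simp

-- A's double loop is selection sort
theorem pvOuter_eq (n : Nat) : ∀ (suf pre : List Int) (lo hi : Int),
    suf.length = n → lo = (pre.length : Int) → hi = lo + suf.length →
    (PySem.List.pyRange lo hi 1).foldl
      (fun s i =>
        (PySem.List.pyRange (i + 1) (s.length : Int) 1).foldl
          (fun s j =>
            if PySem.List.pyGetD s j 0 < PySem.List.pyGetD s i 0 then
              PySem.List.pySetD (PySem.List.pySetD s i (PySem.List.pyGetD s j 0)) j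
                (PySem.List.pyGetD s i 0)
            else s) s) (pre ++ suf)
    = pre ++ pvSSort suf := by
  induction n with
  | zero =>
    intro suf pre lo hi hn hlo hhi
    rw [List.length_eq_zero_iff.1 hn]
    have h : hi ≤ lo := by rw [List.length_eq_zero_iff.1 hn] at hhi; simp at hhi; omega
    rw [PySem.List.pyRange_one_eq_nil h]
    simp [pvSSort]
  | succ m ih =>
    intro suf pre lo hi hn hlo hhi
    obtain ⟨a, rest, rfl⟩ : ∃ a rest, suf = a :: rest := by
      cases suf with
      | nil => simp at hn
      | cons a rest => exact ⟨a, rest, rfl⟩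
    have hlt : lo < hi := by simp at hhi; omega
    rw [PySem.List.pyRange_one_cons hlt, List.foldl_cons]
    subst hlo
    have hfirst :
        (PySem.List.pyRange ((pre.length : Int) + 1) (((pre ++ a :: rest).length : Nat) : Int) 1).foldl
          (fun s j =>
            if PySem.List.pyGetD s j 0 < PySem.List.pyGetD s (pre.length : Int) 0 then
              PySem.List.pySetD (PySem.List.pySetD s (pre.length : Int) (PySem.List.pyGetD s j 0)) j
                (PySem.List.pyGetD s (pre.length : Int) 0)
            else s) (pre ++ a :: rest)
        = pre ++ (pvGo a rest).1 :: (pvGo a rest).2 := by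
      have := pvInner_eq rest pre [] a ((pre.length : Int) + 1)
        (((pre ++ a :: rest).length : Nat) : Int) (by simp) (by simp; omega)
      simpa using this
    rw [hfirst]
    have hres : pre ++ (pvGo a rest).1 :: (pvGo a rest).2
        = (pre ++ [(pvGo a rest).1]) ++ (pvGo a rest).2 := by simp
    rw [hres]
    rw [ih (pvGo a rest).2 (pre ++ [(pvGo a rest).1]) ((pre.length : Int) + 1) hi
      (by rw [pvGo_length]; simpa using hn) (by simp)
      (by rw [pvGo_length]; simp at hhi ⊢; omega)]
    simp only [pvSSort]
    simp

-- A's abs loop is map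
theorem pvAbs_eq (nums : List Int) :
    nums.foldl (fun acc x => if x < 0 then acc ++ [-x] else acc ++ [x]) []
    = nums.map (fun x => if x < 0 then -x else x) := by
  have h : ∀ (acc : List Int) (x : Int), x ∈ nums →
      (if x < 0 then acc ++ [-x] else acc ++ [x]) = acc ++ [if x < 0 then -x else x] := by
    intro acc x _; by_cases h : x < 0 <;> simp [h]
  rw [PySem.List.foldl_congr_mem nums _ _ [] (fun acc x hx => h acc x hx),
    PySem.List.foldl_append_singleton_eq_map]
  simp

theorem pvFound_eq (seen : List Int) (x : Int) : pvFound seen x = seen.contains x := by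
  induction seen with
  | nil => simp [pvFound]
  | cons s rest ih =>
    by_cases h : s = x
    · simp [pvFound, h]
    · simp [pvFound, h, ih]
      exact fun h' => absurd h'.symm h

-- A's dedup loop builds set-of-list (first occurrences, in order)
theorem pvDedup_eq (l : List Int) :
    l.foldl (fun seen x => if pvFound seen x then seen else seen ++ [x]) []
    = PySem.Set.ofList l := by
  rw [PySem.Set.ofList_eq_foldl]
  exact PySem.List.foldl_congr_mem l _ _ [] (fun seen x _ => by
    simp [pvFound_eq, PySem.Set.add, PySem.Set.contains])

-- last element of a nonempty list via Python's l[-1]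
theorem pvLast (l : List Int) (h : l ≠ []) : PySem.List.pyGetD l (-1) 0 = l.getLast h := by
  have hl : 1 ≤ l.length := by
    cases l with | nil => exact absurd rfl h | cons a t => simp
  simp [PySem.List.pyGetD, PySem.List.pyGet?, PySem.List.pyIdx?, hl,
    List.getElem?_eq_getElem (by omega : l.length - 1 < l.length), List.getLast_eq_getElem]

theorem pvLeLast (l : List Int) (hp : l.Pairwise (· ≤ ·)) (hne : l ≠ []) :
    ∀ a ∈ l, a ≤ l.getLast hne := by
  induction l with
  | nil => simp
  | cons x t ih =>
    intro a ha
    rcases List.mem_cons.1 ha with rfl | ha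
    · cases t with
      | nil => simp
      | cons y s =>
        have : a ≤ (y :: s).getLast (by simp) :=
          le_trans ((List.pairwise_cons.1 hp).1 y (by simp))
            (ih (List.pairwise_cons.1 hp).2 (by simp) y (by simp))
        simpa [List.getLast] using this
    · cases t with
      | nil => simp at ha
      | cons y s =>
        have := ih (List.pairwise_cons.1 hp).2 (by simp) a ha
        simpa [List.getLast] using this

-- B's adjacency pass: on sorted input it yields a strictly increasing list with the same members
theorem pvBPass (xs : List Int) : ∀ (acc : List Int), acc.Pairwise (· < ·) →
    xs.Pairwise (· ≤ ·) → (∀ b ∈ acc, ∀ y ∈ xs, b ≤ y) →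
    (xs.foldl (fun result x =>
        if result.isEmpty || PySem.List.pyGetD result (-1) 0 != x then result ++ [x]
        else result) acc).Pairwise (· < ·)
    ∧ ∀ z, (z ∈ xs.foldl (fun result x =>
        if result.isEmpty || PySem.List.pyGetD result (-1) 0 != x then result ++ [x]
        else result) acc ↔ z ∈ acc ∨ z ∈ xs) := by
  induction xs with
  | nil => intro acc h1 _ _; simpa using h1
  | cons x rest ih =>
    intro acc h1 h2 h3
    rw [List.foldl_cons]
    by_cases hacc : acc = []
    · subst hacc
      simp only [List.isEmpty_nil, Bool.true_or, if_pos, List.nil_append]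
      obtain ⟨hp, hm⟩ := ih [x] (by simp)
        (List.pairwise_cons.1 h2).2
        (by intro b hb y hy; simp at hb; subst hb; exact (List.pairwise_cons.1 h2).1 y hy)
      refine ⟨hp, fun z => ?_⟩
      rw [hm z]; simp
    · have hlast := pvLast acc hacc
      have hle : acc.getLast hacc ≤ x := h3 _ (List.getLast_mem hacc) x (by simp)
      by_cases heq : acc.getLast hacc = x
      · have hcond : (acc.isEmpty || PySem.List.pyGetD acc (-1) 0 != x) = false := by
          simp [hlast, heq, hacc]
        rw [hcond, if_neg (by simp)]
        obtain ⟨hp, hm⟩ := ih acc h1 (List.pairwise_cons.1 h2).2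
          (fun b hb y hy => h3 b hb y (List.mem_cons_of_mem _ hy))
        refine ⟨hp, fun z => ?_⟩
        rw [hm z]
        constructor
        · rintro (h | h)
          · exact Or.inl h
          · exact Or.inr (List.mem_cons_of_mem _ h)
        · rintro (h | h)
          · exact Or.inl h
          · rcases List.mem_cons.1 h with rfl | h
            · exact Or.inl (heq ▸ List.getLast_mem hacc)
            · exact Or.inr h
      · have hcond : (acc.isEmpty || PySem.List.pyGetD acc (-1) 0 != x) = true := by
          simp [hlast, heq]
        rw [hcond, if_pos rfl]
        have hlt : ∀ b ∈ acc, b < x := fun b hb =>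
          lt_of_le_of_lt (pvLeLast acc (h1.imp le_of_lt) hacc b hb)
            (lt_of_le_of_ne hle heq)
        obtain ⟨hp, hm⟩ := ih (acc ++ [x])
          (List.pairwise_append.2 ⟨h1, by simp, by simpa using hlt⟩)
          (List.pairwise_cons.1 h2).2
          (by
            intro b hb y hy
            rcases List.mem_append.1 hb with hb | hb
            · exact h3 b hb y (List.mem_cons_of_mem _ hy)
            · simp at hb; subst hb; exact (List.pairwise_cons.1 h2).1 y hy)
        refine ⟨hp, fun z => ?_⟩
        rw [hm z]
        simp only [List.mem_append, List.mem_cons]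
        tauto

-- strictly increasing integer lists with the same members are equal
theorem pvUnique (l1 l2 : List Int) (h1 : l1.Pairwise (· < ·)) (h2 : l2.Pairwise (· < ·))
    (hm : ∀ z, z ∈ l1 ↔ z ∈ l2) : l1 = l2 := by
  have n1 : l1.Nodup := h1.imp (fun h => ne_of_lt h)
  have n2 : l2.Nodup := h2.imp (fun h => ne_of_lt h)
  have hp : l1.Perm l2 := (List.perm_ext_iff_of_nodup n1 n2).mpr hm
  exact List.Perm.eq_of_pairwise (fun a b _ _ h h' => absurd h (asymm h')) h1 h2 hp

-- ===== VERDICT (by name: the statement is the Claim_ definition above) =====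
theorem pipeline_abs_dedup_sort_spec : Claim_equal_pipeline_abs_dedup_sort := by
  intro nums _
  unfold Spec_pipeline_abs_dedup_sort pipeline_abs_dedup_sort pipeline_abs_dedup_sort_alt
  simp only [pvAbs_eq, pvDedup_eq]
  set f : Int → Int := fun x => if x < 0 then -x else x with hf
  set av : List Int := nums.map f with hav
  set seen : List Int := PySem.Set.ofList av with hseen
  have hA : (PySem.List.pyRange 0 (seen.length : Int) 1).foldl
      (fun s i =>
        (PySem.List.pyRange (i + 1) (s.length : Int) 1).foldl
          (fun s j =>
            if PySem.List.pyGetD s j 0 < PySem.List.pyGetD s i 0 then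
              PySem.List.pySetD (PySem.List.pySetD s i (PySem.List.pyGetD s j 0)) j
                (PySem.List.pyGetD s i 0)
            else s) s) seen = pvSSort seen := by
    have := pvOuter_eq seen.length seen [] 0 (seen.length : Int) rfl (by simp) (by simp)
    simpa using this
  rw [hA]
  -- A's side: strictly increasing, members = members of av
  have hperm := pvSSort_perm seen
  have hAlt : (pvSSort seen).Pairwise (· < ·) :=
    List.Pairwise.imp₂ (fun a b hle hne => lt_of_le_of_ne hle hne)
      (pvSSort_pairwise seen) (hperm.symm.nodup (PySem.Set.nodup_ofList av))
  -- B's side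
  have hsp : (PySem.List.sorted av (fun x => x) false).Pairwise (· ≤ ·) := by
    simpa using PySem.List.sorted_pairwise av (fun x => x)
  obtain ⟨hBlt, hBmem⟩ := pvBPass (PySem.List.sorted av (fun x => x) false) [] (by simp) hsp
    (by simp)
  refine pvUnique _ _ hAlt hBlt ?_
  intro z
  rw [hperm.mem_iff, hBmem z]
  simp [PySem.List.mem_sorted, hseen, PySem.Set.mem_ofList]
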